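-- pv_equiv track=rewrite | github.com/YarinPerez/Context_Window_Experiments | exp2/scripts/generate_combined_docs.py | select_document_order
-- ===== SOURCE A (Python) =====
-- import itertools
-- from typing import List, Dict
--
-- def select_document_order(num_docs: int, target_file: str,
--                          available_files: List[str]) -> List[str]:
--     """
--     Deterministically select document order with target at middle position.
--
--     Args:
--         num_docs: Total number of documents needed
--         target_file: Filename of target document (placed at middle)
--         available_files: List of all available filenames
--
--     Returns:
--         List of filenames in order
--     """
--     middle_pos = num_docs // 2
--     order = []
--
--     # Create list of files excluding target
--     other_files = [f for f in available_files if f != target_file]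
--
--     # Create infinite cycle through other files
--     file_cycle = itertools.cycle(other_files)
--
--     # Fill positions before middle
--     for i in range(middle_pos):
--         order.append(next(file_cycle))
--
--     # Insert target at middle position
--     order.append(target_file)
--
--     # Fill positions after middle
--     for i in range(middle_pos + 1, num_docs):
--         order.append(next(file_cycle))
--
--     return order
-- ===== SOURCE B (Python) =====
-- def select_document_order(num_docs, target_file, available_files):
--     others = [f for f in available_files if f != target_file]
--     fill_len = max(num_docs - 1, 0)
--     reps = -(-fill_len // len(others)) if others else 0   # ceil(fill_len / len(others))
--     fill = (others * reps)[:fill_len]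
--     mid = num_docs // 2
--     return fill[:mid] + [target_file] + fill[mid:]
-- ===== Notes on version B (the rewrite author's own statement) =====
-- stated objective: simpler
-- what changed: Instead of consuming a cycle element-by-element in two bracketing loops, B tiles the filtered list whole (others * ceil((n-1)/len(others))), truncates it to n-1 fillers, and splices the target in by slice concatenation fill[:mid]+[target]+fill[mid:] -- no per-element loop, no iterator state, no insert.
import Mathlib
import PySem

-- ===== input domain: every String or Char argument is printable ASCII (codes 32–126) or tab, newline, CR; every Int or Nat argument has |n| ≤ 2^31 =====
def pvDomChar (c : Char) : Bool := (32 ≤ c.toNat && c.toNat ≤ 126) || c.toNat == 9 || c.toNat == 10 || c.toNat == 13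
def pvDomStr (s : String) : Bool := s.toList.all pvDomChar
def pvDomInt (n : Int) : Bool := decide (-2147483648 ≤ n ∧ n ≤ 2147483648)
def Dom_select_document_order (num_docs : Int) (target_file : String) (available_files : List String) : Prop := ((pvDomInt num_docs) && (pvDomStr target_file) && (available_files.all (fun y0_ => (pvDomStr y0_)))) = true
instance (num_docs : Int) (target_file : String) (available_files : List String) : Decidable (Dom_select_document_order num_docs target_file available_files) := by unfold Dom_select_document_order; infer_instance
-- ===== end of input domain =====

-- B tiles the filtered list whole (others * ceil((n-1)/len(others))), truncates to n-1 fillers,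
-- and splices the target in by slice concatenation, replacing A's two element-by-element
-- cycle-consuming fill loops (objective: simpler).

-- ===== PORT A =====
-- itertools.cycle is modelled by a running Nat counter c: next(file_cycle) is
-- other_files[c % len(other_files)] (getD's "" default is only reached when other_files = [],
-- where Python's next raises StopIteration — excluded by Pre_).
def select_document_order (num_docs : Int) (target_file : String) (available_files : List String) : List String :=
  let middle_pos := PySem.Int.floordiv num_docs 2
  let other_files := available_files.filter (fun f => f ≠ target_file)
  let st1 := (PySem.List.pyRange 0 middle_pos 1).foldl
      (fun (p : List String × Nat) _ => (p.1 ++ [other_files.getD (p.2 % other_files.length) ""], p.2 + 1)) ([], 0)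
  let st2 : List String × Nat := (st1.1 ++ [target_file], st1.2)
  let st3 := (PySem.List.pyRange (middle_pos + 1) num_docs 1).foldl
      (fun (p : List String × Nat) _ => (p.1 ++ [other_files.getD (p.2 % other_files.length) ""], p.2 + 1)) st2
  st3.1

-- ===== PORT B =====
-- others * reps is (List.replicate reps others).flatten; the -(-fill_len // L) ceiling
-- division and the slices are exact (slice clamps like Python; negative mid only occurs
-- with fill = [], where both slices are []).
def select_document_order_alt (num_docs : Int) (target_file : String) (available_files : List String) : List String :=
  let others := available_files.filter (fun f => f ≠ target_file)
  let fill_len := max (num_docs - 1) 0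
  let reps : Int := if others ≠ [] then -(PySem.Int.floordiv (-fill_len) others.length) else 0
  let fill := PySem.List.slice ((List.replicate reps.toNat others).flatten) none (some fill_len)
  let mid := PySem.Int.floordiv num_docs 2
  PySem.List.slice fill none (some mid) ++ [target_file] ++ PySem.List.slice fill (some mid) none

-- ===== PRECONDITION & SPEC =====
-- Pre_ excludes exactly the inputs where A raises StopIteration:
-- num_docs ≥ 2 while every available file equals the target, leaving nothing to cycle through.
def Pre_select_document_order (num_docs : Int) (target_file : String) (available_files : List String) : Prop :=
  num_docs ≤ 1 ∨ ∃ f ∈ available_files, f ≠ target_file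
instance (num_docs : Int) (target_file : String) (available_files : List String) : Decidable (Pre_select_document_order num_docs target_file available_files) := by unfold Pre_select_document_order; infer_instance
def pvWitness_select_document_order : Int × String × List String := (5, "t", ["a", "b", "t", "c"])
def Spec_select_document_order (num_docs : Int) (target_file : String) (available_files : List String) (out : List String) : Prop := out = select_document_order_alt num_docs target_file available_files
instance (num_docs : Int) (target_file : String) (available_files : List String) (out : List String) : Decidable (Spec_select_document_order num_docs target_file available_files out) := by unfold Spec_select_document_order; infer_instance

-- ===== CLAIM (what is proved, stated in full; the proofs are below) =====
def Claim_equal_select_document_order : Prop := ∀ (num_docs : Int) (target_file : String) (available_files : List String), Dom_select_document_order num_docs target_file available_files → Pre_select_document_order num_docs target_file available_files → Spec_select_document_order num_docs target_file available_files (select_document_order num_docs target_file available_files)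

-- ===== LEMMAS AND PROOFS =====

-- A's fill loops ignore the loop variable: the fold result depends only on the list's length.
theorem pv_fold_cycle (others : List String) (l : List Int) (acc : List String) (c : Nat) :
    l.foldl (fun (p : List String × Nat) _ =>
        (p.1 ++ [others.getD (p.2 % others.length) ""], p.2 + 1)) (acc, c)
    = (acc ++ (List.range l.length).map (fun j => others.getD ((c + j) % others.length) ""), c + l.length) := by
  induction l generalizing acc c with
  | nil => simp
  | cons x xs ih =>
      simp only [List.foldl_cons, ih, List.length_cons, List.range_succ_eq_map, Prod.mk.injEq]
      refine ⟨?_, by omega⟩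
      simp [Function.comp_def, Nat.add_comm, Nat.add_left_comm]

-- take k of a list is the modular-free map over range k (k ≤ length).
theorem pv_take_eq_map_range (others : List String) (k : Nat) (hk : k ≤ others.length) :
    others.take k = (List.range k).map (fun j => others.getD j "") := by
  apply List.ext_getElem
  · simp [hk]
  · intro i h1 h2
    simp at h1 h2 ⊢
    simp [List.getElem?_eq_getElem h1.2]

-- truncating the tiled list gives the modular cycle.
theorem pv_tile_take (others : List String) (r k : Nat) (hne : others ≠ [])
    (hk : k ≤ r * others.length) :
    ((List.replicate r others).flatten).take k
      = (List.range k).map (fun j => others.getD (j % others.length) "") := by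
  induction r generalizing k with
  | zero =>
      have : k = 0 := by omega
      subst this; simp
  | succ r ih =>
      rw [List.replicate_succ, List.flatten_cons]
      by_cases hle : k ≤ others.length
      · rw [List.take_append_of_le_length hle, pv_take_eq_map_range _ _ hle]
        apply List.map_congr_left
        intro j hj
        simp at hj
        rw [Nat.mod_eq_of_lt (by omega)]
      · have hL : 0 < others.length := List.length_pos_of_ne_nil hne
        rw [List.take_append, List.take_of_length_le (by omega),
            ih (k - others.length) (by rw [Nat.succ_mul] at hk; omega)]
        conv_rhs => rw [show k = others.length + (k - others.length) by omega,
                        List.range_add, List.map_append, List.map_map]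
        congr 1
        · have hmodfree : List.map (fun j => others.getD (j % others.length) "") (List.range others.length)
              = List.map (fun j => others.getD j "") (List.range others.length) := by
            apply List.map_congr_left
            intro j hj
            simp at hj
            rw [Nat.mod_eq_of_lt hj]
          rw [hmodfree, ← pv_take_eq_map_range others others.length (le_refl _),
              List.take_of_length_le (le_refl _)]
        · apply List.map_congr_left
          intro j hj
          simp [Nat.add_mod_left]

-- ===== VERDICT (by name: the statement is the Claim_ definition above) =====
theorem select_document_order_spec : Claim_equal_select_document_order := by
  intro n t fs _ hpre
  unfold Spec_select_document_order select_document_order select_document_order_alt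
  set others := fs.filter (fun f => f ≠ t) with hothers
  set mid := PySem.Int.floordiv n 2 with hmid
  have hbr := (PySem.Int.floordiv_eq_iff_of_pos (a := n) (b := 2) (q := mid) (by omega)).mp rfl
  by_cases h1 : 1 ≤ n
  · -- n ≥ 1: mid = m ≥ 0, the second fill has s = n - mid - 1 ≥ 0 steps
    obtain ⟨m, hm⟩ : ∃ m : Nat, mid = (m : Int) := ⟨mid.toNat, by omega⟩
    obtain ⟨s, hs⟩ : ∃ s : Nat, n - (mid + 1) = (s : Int) := ⟨(n - (mid + 1)).toNat, by omega⟩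
    have hlen1 : (PySem.List.pyRange 0 mid 1).length = m := by
      rw [PySem.List.length_pyRange_one]; omega
    have hlen2 : (PySem.List.pyRange (mid + 1) n 1).length = s := by
      rw [PySem.List.length_pyRange_one]; omega
    simp only [pv_fold_cycle, hlen1, hlen2, Nat.zero_add, List.nil_append]
    have hfl : max (n - 1) 0 = ((m + s : Nat) : Int) := by push_cast; omega
    by_cases hne : others = []
    · -- all files equal the target: Pre_ forces n = 1, so both fills are empty
      have hn1 : n = 1 := by
        rcases hpre with hle | ⟨f, hf, hft⟩
        · omega
        · exfalso
          have : f ∈ others := List.mem_filter.mpr ⟨hf, by simpa using hft⟩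
          rw [hne] at this; exact absurd this (List.not_mem_nil)
      have hm0 : m = 0 := by omega
      have hs0 : s = 0 := by omega
      subst hm0 hs0
      rw [hfl] at *
      simp [hne, hm, PySem.List.slice]
    · have hL : 0 < others.length := List.length_pos_of_ne_nil hne
      simp only [ne_eq, hne, not_false_eq_true, if_true]
      set reps : Int := -(PySem.Int.floordiv (-(max (n-1) 0)) others.length) with hreps
      have hceil := (PySem.Int.neg_floordiv_neg_eq_iff_of_pos
        (a := max (n-1) 0) (b := (others.length : Int)) (q := reps) (by exact_mod_cast hL)).mp rfl
      have hrk : (m + s : Nat) ≤ reps.toNat * others.length := by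
        have h2 : ((m+s : Nat) : Int) ≤ reps * others.length := by rw [← hfl]; exact hceil.2
        have hrnn : 0 ≤ reps := by nlinarith [hceil.2, hfl]
        have : ((reps.toNat * others.length : Nat) : Int) = reps * others.length := by
          push_cast; rw [Int.toNat_of_nonneg hrnn]
        omega
      have hfill : PySem.List.slice ((List.replicate reps.toNat others).flatten) none (some (max (n-1) 0))
          = (List.range (m + s)).map (fun j => others.getD (j % others.length) "") := by
        rw [hfl, PySem.List.slice_to_natCast]
        exact pv_tile_take others reps.toNat (m+s) hne hrk
      rw [hfill, hm, PySem.List.slice_to_natCast, PySem.List.slice_from_natCast]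
      rw [List.range_add, List.map_append, List.take_append_of_le_length (by simp),
          List.take_of_length_le (by simp), List.drop_append_of_le_length (by simp)]
      rw [List.drop_of_length_le (by simp), List.map_map]
      simp [Function.comp_def, List.append_assoc]
  · -- n ≤ 0: both fills empty, result [t]
    have hr1 : PySem.List.pyRange 0 mid 1 = [] := PySem.List.pyRange_one_eq_nil (by omega)
    have hr2 : PySem.List.pyRange (mid + 1) n 1 = [] := PySem.List.pyRange_one_eq_nil (by omega)
    have hfl : max (n - 1) 0 = 0 := by omega
    simp only [hr1, hr2, List.foldl_nil, hfl]
    simp [PySem.List.slice]
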